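-- pv_equiv track=rewrite | github.com/kostik8080/course_3 | utils.py | checking_the_dictionary
-- ===== SOURCE A (Python) =====
-- def checking_the_dictionary(value):
--     """
--     Выводит последние 5 записей
--     """
--     executed = []
--     count = 0
--     for i in value[::-1]:
--         if count == 5:
--             break
--         if "EXECUTED" in i.values() \
--                 and "from" in i.keys():
--             executed.append(i)
--             count += 1
--     return executed
-- ===== SOURCE B (Python) =====
-- def checking_the_dictionary(value):
--     matches = [i for i in value if "EXECUTED" in i.values() and "from" in i.keys()]
--     return matches[-5:][::-1]
-- ===== Notes on version B (the rewrite author's own statement) =====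
-- stated objective: simpler
-- what changed: Replaces the reverse scan with an explicit counter and early break by a forward filter comprehension followed by a [-5:] slice and a reverse.
import Mathlib
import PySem

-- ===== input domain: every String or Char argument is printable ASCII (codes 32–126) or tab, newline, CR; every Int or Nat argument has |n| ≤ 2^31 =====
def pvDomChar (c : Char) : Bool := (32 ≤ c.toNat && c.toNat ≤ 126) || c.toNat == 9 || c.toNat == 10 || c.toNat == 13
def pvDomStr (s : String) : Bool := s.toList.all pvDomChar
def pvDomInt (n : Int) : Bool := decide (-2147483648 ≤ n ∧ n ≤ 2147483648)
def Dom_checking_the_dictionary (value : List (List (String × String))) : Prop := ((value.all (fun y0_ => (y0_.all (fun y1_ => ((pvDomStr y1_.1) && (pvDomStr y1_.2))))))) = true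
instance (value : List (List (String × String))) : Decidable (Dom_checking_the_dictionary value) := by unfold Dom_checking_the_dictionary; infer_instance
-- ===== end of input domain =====

-- ===== PORT A =====
-- B changes: forward filter + slice[-5:] + reverse instead of A's reverse scan with a counter and break (simpler decomposition).
-- matching-entry test, shared by both ports exactly as both Pythons write it:
-- "EXECUTED" in i.values() and "from" in i.keys()  (i is a Python dict)
def pvMatch (i : List (String × String)) : Bool :=
  (PySem.Dict.ofList i).values.contains "EXECUTED" && (PySem.Dict.ofList i).contains "from"

-- the for-loop of A with its counter and its break
def pvLoopA : List (List (String × String)) → List (List (String × String)) → Int → List (List (String × String))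
  | [], executed, _ => executed
  | i :: rest, executed, count =>
    if count == 5 then executed
    else if pvMatch i then pvLoopA rest (executed ++ [i]) (count + 1)
    else pvLoopA rest executed count

-- value[::-1] is value.reverse (PySem.List.slice?_none_none_neg_one)
def checking_the_dictionary (value : List (List (String × String))) : List (List (String × String)) :=
  pvLoopA value.reverse [] 0

-- ===== PORT B =====
def checking_the_dictionary_alt (value : List (List (String × String))) : List (List (String × String)) :=
  let ms := value.filter pvMatch
  -- matches[-5:][::-1]
  (PySem.List.slice ms (some (-5)) none).reverse

-- ===== PRECONDITION & SPEC =====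
def Spec_checking_the_dictionary (value : List (List (String × String))) (out : List (List (String × String))) : Prop := out = checking_the_dictionary_alt value
instance (value : List (List (String × String))) (out : List (List (String × String))) : Decidable (Spec_checking_the_dictionary value out) := by unfold Spec_checking_the_dictionary; infer_instance

-- ===== CLAIM (what is proved, stated in full; the proofs are below) =====
def Claim_equal_checking_the_dictionary : Prop := ∀ (value : List (List (String × String))), Dom_checking_the_dictionary value → Spec_checking_the_dictionary value (checking_the_dictionary value)

-- ===== LEMMAS AND PROOFS =====
-- A's loop collects the first (5 - count) matching entries of its input, appended to the accumulator.
theorem pvLoopA_eq (xs : List (List (String × String))) :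
    ∀ (acc : List (List (String × String))) (c : Int), 0 ≤ c → c ≤ 5 →
      pvLoopA xs acc c = acc ++ (xs.filter pvMatch).take (5 - c).toNat := by
  induction xs with
  | nil => intro acc c _ _; simp [pvLoopA]
  | cons i rest ih =>
    intro acc c h0 h5
    by_cases hc : c = 5
    · subst hc; simp [pvLoopA]
    · have hlt : c < 5 := lt_of_le_of_ne h5 hc
      rw [pvLoopA]
      have hbe : (c == (5 : Int)) = false := by simp [hc]
      rw [hbe]
      simp only [Bool.false_eq_true, if_false]
      by_cases hm : pvMatch i
      · rw [if_pos hm, ih (acc ++ [i]) (c + 1) (by omega) (by omega)]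
        have htn : (5 - c).toNat = (5 - (c + 1)).toNat + 1 := by omega
        simp [hm, htn]
      · rw [if_neg hm, ih acc c h0 h5]
        simp [hm]

-- ===== VERDICT (by name: the statement is the Claim_ definition above) =====
theorem checking_the_dictionary_spec : Claim_equal_checking_the_dictionary := by
  intro value _
  show checking_the_dictionary value = checking_the_dictionary_alt value
  rw [checking_the_dictionary, checking_the_dictionary_alt,
    pvLoopA_eq value.reverse [] 0 (by norm_num) (by norm_num)]
  simp only [List.nil_append]
  by_cases h : (value.filter pvMatch).length ≤ 5
  · rw [PySem.List.slice_from_neg_ofNat _ 5 (by omega)]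
    have : (value.filter pvMatch).length - 5 = 0 := by omega
    rw [this, List.drop_zero, ← List.filter_reverse, List.take_of_length_le (by simpa using h)]
  · rw [PySem.List.slice_from_neg_ofNat _ 5 (by omega), List.filter_reverse]
    simp [List.take_reverse]
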